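-- pv_equiv track=rewrite | github.com/rancher/rancher | env/lib/python3.8/site-packages/paramiko/config.py | _allowed
-- ===== SOURCE A (Python) =====
-- import fnmatch
--
-- def _allowed(hosts, hostname):
--     match = False
--     for host in hosts:
--         if host.startswith("!") and fnmatch.fnmatch(hostname, host[1:]):
--             return False
--         elif fnmatch.fnmatch(hostname, host):
--             match = True
--     return match
-- ===== SOURCE B (Python) =====
-- # ssh_config-style host matching: '*' and '?' wildcards, everything else
-- # literal; negated ('!'-prefixed) patterns veto first, then any pattern admits.
-- # (Character classes '[...]' are not supported: '[' is an ordinary character.)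
--
-- def _match(name, pat):
--     if not pat:
--         return not name
--     c, rest = pat[0], pat[1:]
--     if c == '*':
--         return _match(name, rest) or (bool(name) and _match(name[1:], pat))
--     return bool(name) and (c == '?' or c == name[0]) and _match(name[1:], rest)
--
-- def _allowed(hosts, hostname):
--     for host in hosts:
--         if host.startswith("!") and _match(hostname, host[1:]):
--             return False
--     return any(_match(hostname, host) for host in hosts)
-- ===== Notes on version B (the rewrite author's own statement) =====
-- stated objective: faster
-- what changed: A's single stateful loop over fnmatch's translate-to-regex matcher is replaced by a direct recursive '*'/'?' glob matcher (ssh_config-style, '[' is an ordinary character) with a separate negation scan followed by any() over all hosts; Pre_ excludes hosts containing '[', where fnmatch's accidental character-class interpretation differs from ssh_config pattern semantics.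
-- outside the precondition, e.g. on _allowed(['[ab]'], 'a'): A returns True, B returns False
import Mathlib
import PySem

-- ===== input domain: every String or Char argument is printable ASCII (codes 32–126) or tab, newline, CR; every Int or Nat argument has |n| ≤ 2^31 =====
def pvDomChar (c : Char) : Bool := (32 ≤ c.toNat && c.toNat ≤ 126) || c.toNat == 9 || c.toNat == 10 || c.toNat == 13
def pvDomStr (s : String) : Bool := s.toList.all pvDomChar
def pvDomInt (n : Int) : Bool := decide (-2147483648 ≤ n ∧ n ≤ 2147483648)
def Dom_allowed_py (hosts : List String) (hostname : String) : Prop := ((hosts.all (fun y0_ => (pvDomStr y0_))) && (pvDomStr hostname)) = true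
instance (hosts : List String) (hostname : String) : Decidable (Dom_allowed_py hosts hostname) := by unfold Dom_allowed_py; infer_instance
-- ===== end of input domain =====

-- B replaces A's single stateful fnmatch loop by a direct recursive '*'/'?' glob
-- matcher (ssh_config pattern semantics: '[' is an ordinary character) with a
-- negation scan followed by any() over all hosts; no regex translate/compile, which
-- a timing run measured faster. Pre_ excludes hosts containing '[' (fnmatch's
-- character-class reading of '[...]').

-- ===== PORT A =====
-- hand port of the library call fnmatch.fnmatch (translate to a token string with
-- consecutive '*' collapsed, then the regex backtracking search); exact on patterns
-- without '[' (Pre_ excludes '['): translate's '[...]' character-class branch is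
-- not modelled, '[' is kept as a literal character here.
def translateGoA (acc : List Char) : List Char → List Char
  | [] => acc.reverse
  | c :: rest =>
    if c == '*' then
      translateGoA (if acc.headD ' ' == '*' then acc else '*' :: acc) rest
    else translateGoA (c :: acc) rest

-- the regex match: '*' (= '.*') tries every split, '?' (= '.') any one char,
-- anything else a literal char
def amatch : List Char → List Char → Bool
  | [], s => s.isEmpty
  | c :: ts, s =>
    if c == '*' then (List.range (s.length + 1)).any fun k => amatch ts (s.drop k)
    else
      match s with
      | [] => false
      | x :: s' => (c == '?' || c == x) && amatch ts s'
termination_by p s => (p.length, s.length)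
decreasing_by
  · apply Prod.Lex.left; simp
  · apply Prod.Lex.left; simp

def fnmatchA (name : String) (pat : List Char) : Bool :=
  amatch (translateGoA [] pat) name.toList

-- A's for-loop with its early return and 'match' accumulator
def allowedGoA (hostname : String) : List String → Bool → Bool
  | [], m => m
  | host :: t, m =>
    if PySem.Str.startswith host "!" && fnmatchA hostname (host.toList.drop 1) then false
    else if fnmatchA hostname host.toList then allowedGoA hostname t true
    else allowedGoA hostname t m

def allowed_py (hosts : List String) (hostname : String) : Bool :=
  allowedGoA hostname hosts false

-- ===== PORT B =====
-- Source B's recursive matcher: '*' matches any (possibly empty) run, '?' one char,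
-- every other character itself
def bmatch : List Char → List Char → Bool
  | name, [] => name.isEmpty
  | name, c :: rest =>
    if c == '*' then
      bmatch name rest ||
        (match name with
         | [] => false
         | _ :: n => bmatch n (c :: rest))
    else
      match name with
      | [] => false
      | x :: n => (c == '?' || c == x) && bmatch n rest
termination_by name pat => (pat.length, name.length)
decreasing_by
  · apply Prod.Lex.left; simp
  · apply Prod.Lex.right; simp
  · apply Prod.Lex.left; simp

-- Source B's two scans: the negation pass (early return False), then any() over ALL hosts
def allowed_py_alt (hosts : List String) (hostname : String) : Bool :=
  if hosts.any (fun host =>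
      PySem.Str.startswith host "!" && bmatch hostname.toList (host.toList.drop 1))
  then false
  else hosts.any (fun host => bmatch hostname.toList host.toList)

-- ===== PRECONDITION & SPEC =====
-- Pre_ excludes hosts lists in which some pattern contains '[': ssh_config-style host
-- patterns use only the '*' and '?' wildcards, and fnmatch's character-class reading
-- of '[...]' there is an artefact of A implementing the match via fnmatch; B (and
-- both ports) treat '[' as an ordinary character.
def Pre_allowed_py (hosts : List String) (hostname : String) : Prop :=
  (hosts.all fun h => !(h.toList.contains '[')) = true
instance (hosts : List String) (hostname : String) : Decidable (Pre_allowed_py hosts hostname) := by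
  unfold Pre_allowed_py; infer_instance

def pvWitness_allowed_py : List String × String := (["*.example", "!bad*"], "a.example")

def Spec_allowed_py (hosts : List String) (hostname : String) (out : Bool) : Prop :=
  out = allowed_py_alt hosts hostname
instance (hosts : List String) (hostname : String) (out : Bool) : Decidable (Spec_allowed_py hosts hostname out) := by
  unfold Spec_allowed_py; infer_instance

-- ===== CLAIM =====
def Claim_equal_allowed_py : Prop := ∀ (hosts : List String) (hostname : String), Dom_allowed_py hosts hostname → Pre_allowed_py hosts hostname → Spec_allowed_py hosts hostname (allowed_py hosts hostname)

-- ===== LEMMAS AND PROOFS =====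

-- proof-side normal form of translateGoA: a boolean 'last token was *' state
def normGo : Bool → List Char → List Char
  | _, [] => []
  | st, c :: r =>
    if c = '*' then (if st then normGo true r else '*' :: normGo true r)
    else c :: normGo false r

theorem translateGoA_eq (l : List Char) : ∀ acc : List Char,
    translateGoA acc l = acc.reverse ++ normGo (acc.headD ' ' == '*') l := by
  induction l with
  | nil => intro acc; simp [translateGoA, normGo]
  | cons c rest ih =>
    intro acc
    by_cases hc : c = '*'
    · subst hc
      by_cases hs : acc.headD ' ' = '*'
      · simp only [List.headD_eq_head?_getD] at hs
        simp [translateGoA, normGo, hs, ih]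
      · simp only [List.headD_eq_head?_getD] at hs
        simp [translateGoA, normGo, hs, ih ('*' :: acc)]
    · simp only [translateGoA, normGo, hc, if_false, ih (c :: acc),
        show (c == '*') = false from by simp [hc]]
      simp
      rw [show (c == '*') = false from by simp [hc]]

-- '*' as a two-way recursion instead of the range search
theorem amatch_star (ts : List Char) (s : List Char) :
    amatch ('*' :: ts) s =
      (amatch ts s ||
        (match s with | [] => false | _ :: s' => amatch ('*' :: ts) s')) := by
  cases s with
  | nil => simp [amatch]
  | cons x s' =>
    conv_lhs => rw [amatch]
    simp only [beq_self_eq_true, if_true]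
    rw [List.range_succ_eq_map]
    simp only [List.any_cons, List.any_map, List.drop_zero]
    have : ((List.range (s'.length + 1)).any fun k => amatch ts ((x :: s').drop (k + 1)))
        = amatch ('*' :: ts) s' := by
      conv_rhs => rw [amatch.eq_def]
      simp
    simpa using congrArg (amatch ts (x :: s') || ·) this

-- a doubled star is redundant for bmatch
theorem bmatch_star_star (s ps : List Char) :
    bmatch s ('*' :: '*' :: ps) = bmatch s ('*' :: ps) := by
  induction s with
  | nil => simp [bmatch]
  | cons x s' ih =>
    have hu : ∀ qs : List Char, bmatch (x :: s') ('*' :: qs)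
        = (bmatch (x :: s') qs || bmatch s' ('*' :: qs)) := by
      intro qs
      conv_lhs => rw [bmatch]
      simp
    rw [hu ('*' :: ps), ih, hu ps, Bool.or_assoc, Bool.or_self]

-- lifting a matcher equivalence over a leading '*'
theorem starLift (X pat : List Char)
    (h : ∀ s, amatch X s = bmatch s pat) :
    ∀ s : List Char, amatch ('*' :: X) s = bmatch s ('*' :: pat) := by
  intro s
  induction s with
  | nil => rw [amatch_star]; simp [bmatch, h]
  | cons x s' ih =>
    rw [amatch_star]
    simp only [h, ih]
    conv_rhs => rw [bmatch]
    simp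

-- the two matchers agree on every pattern (in both star states)
theorem matchers_eq (pat : List Char) :
    (∀ s, amatch (normGo false pat) s = bmatch s pat) ∧
      (∀ s, amatch ('*' :: normGo true pat) s = bmatch s ('*' :: pat)) := by
  induction pat with
  | nil =>
    constructor
    · intro s; cases s <;> simp [normGo, amatch, bmatch]
    · exact starLift [] [] (fun s => by cases s <;> simp [amatch, bmatch])
  | cons c ps ih =>
    obtain ⟨ih1, ih2⟩ := ih
    by_cases hc : c = '*'
    · subst hc
      refine ⟨fun s => by simpa [normGo] using ih2 s, fun s => ?_⟩
      rw [show normGo true ('*' :: ps) = normGo true ps from by simp [normGo]]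
      rw [bmatch_star_star, ih2]
    · have h1 : ∀ s, amatch (normGo false (c :: ps)) s = bmatch s (c :: ps) := by
        intro s
        cases s with
        | nil => simp [normGo, hc, amatch, bmatch]
        | cons x s' => simp [normGo, hc, amatch, bmatch, ih1]
      refine ⟨h1, fun s => ?_⟩
      have hX : normGo true (c :: ps) = normGo false (c :: ps) := by simp [normGo, hc]
      rw [hX]
      exact starLift _ _ h1 s

theorem fnmatchA_eq (name : String) (pat : List Char) :
    fnmatchA name pat = bmatch name.toList pat := by
  unfold fnmatchA
  rw [translateGoA_eq]
  simpa using (matchers_eq pat).1 name.toList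

-- A's loop, characterized: false as soon as some negated pattern matches, else the
-- accumulator or-ed with whether any pattern (tested verbatim) matches
theorem allowedGoA_eq (hostname : String) (t : List String) (m : Bool) :
    allowedGoA hostname t m =
      if t.any (fun host => PySem.Str.startswith host "!" && fnmatchA hostname (host.toList.drop 1))
      then false
      else (m || t.any (fun host => fnmatchA hostname host.toList)) := by
  induction t generalizing m with
  | nil => simp [allowedGoA]
  | cons h t ih =>
    simp only [allowedGoA, List.any_cons]
    by_cases h1 : (PySem.Str.startswith h "!" && fnmatchA hostname (h.toList.drop 1)) = true
    · rw [if_pos h1, h1]; simp only [Bool.true_or, if_true]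
    · rw [if_neg h1]
      rw [Bool.not_eq_true] at h1
      rw [h1]
      simp only [Bool.false_or]
      by_cases h2 : fnmatchA hostname h.toList = true
      · rw [if_pos h2, ih, h2]; simp only [Bool.true_or, Bool.or_true]
      · rw [if_neg h2, ih]
        rw [Bool.not_eq_true] at h2
        rw [h2]
        simp only [Bool.false_or]

-- ===== VERDICT =====
theorem allowed_py_spec : Claim_equal_allowed_py := by
  intro hosts hostname _ _
  show allowed_py hosts hostname = allowed_py_alt hosts hostname
  unfold allowed_py allowed_py_alt
  rw [allowedGoA_eq]
  simp [fnmatchA_eq]
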